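-- pv_equiv track=rewrite | github.com/UoA-eResearch/mytardis_ingestion | src/smelters/smelter.py | set_access_controls
-- ===== SOURCE A (Python) =====
-- def set_access_controls(
--     combined_names: set, download_names: list, sensitive_names: list
-- ) -> list:
--     """Helper function to set the access controls for combined list of
--     users/groups.
--
--     Args:
--         combined_names: a set of names of users/groups that is complete for this
--             ingestion object.
--         download_names: a list of names of users/groups that have download access
--         sensitive_names: a list of names of users/groups that have sensitive access
--
--     Returns:
--         A list of tuples containing the access controls.
--     """
--     if isinstance(combined_names, str):
--         combined_names = [combined_names]
--     if isinstance(download_names, str):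
--         combined_names = [download_names]
--     if isinstance(sensitive_names, str):
--         combined_names = [sensitive_names]
--     return_list = []
--     for name in combined_names:
--         download = False
--         sensitive = False
--         if name in download_names:
--             download = True
--         if name in sensitive_names:
--             sensitive = True
--         return_list.append((name, False, download, sensitive))
--     return return_list
-- ===== SOURCE B (Python) =====
-- def set_access_controls(
--     combined_names: set, download_names: list, sensitive_names: list
-- ) -> list:
--     if isinstance(combined_names, str):
--         combined_names = [combined_names]
--     if isinstance(download_names, str):
--         combined_names = [download_names]
--     if isinstance(sensitive_names, str):
--         combined_names = [sensitive_names]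
--     flags = {name: [False, False] for name in combined_names}
--     for n in download_names:
--         if n in flags:
--             flags[n][0] = True
--     for n in sensitive_names:
--         if n in flags:
--             flags[n][1] = True
--     return [(name, False, flags[name][0], flags[name][1]) for name in combined_names]
-- ===== Notes on version B (the rewrite author's own statement) =====
-- stated objective: faster
-- what changed: B replaces A's per-name membership probes into download/sensitive lists with a flags table built once: one pass over each access list marks flags in a dict, then the output is assembled from the table in combined_names order.
import Mathlib
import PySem

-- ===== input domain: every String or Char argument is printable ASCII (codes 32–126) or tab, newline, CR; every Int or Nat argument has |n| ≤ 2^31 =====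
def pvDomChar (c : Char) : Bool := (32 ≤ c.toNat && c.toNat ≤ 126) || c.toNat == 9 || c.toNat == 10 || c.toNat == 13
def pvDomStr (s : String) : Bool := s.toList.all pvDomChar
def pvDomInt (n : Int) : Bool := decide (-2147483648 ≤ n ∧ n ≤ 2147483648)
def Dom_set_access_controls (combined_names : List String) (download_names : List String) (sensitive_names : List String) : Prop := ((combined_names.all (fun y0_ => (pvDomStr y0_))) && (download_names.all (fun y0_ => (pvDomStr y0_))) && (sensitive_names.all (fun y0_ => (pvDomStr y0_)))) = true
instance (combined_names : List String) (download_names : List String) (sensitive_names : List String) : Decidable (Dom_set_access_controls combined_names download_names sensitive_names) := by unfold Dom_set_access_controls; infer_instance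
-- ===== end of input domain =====

-- B builds a flags table in one pass over each access list instead of probing the lists per name
-- (alternative decomposition; equivalence of return values proved below).

-- ===== PORT A =====
-- The three isinstance guards of A never fire on List String inputs (the typed domain), so they vanish.
def set_access_controls (combined_names : List String) (download_names : List String) (sensitive_names : List String) : List (String × Bool × Bool × Bool) :=
  combined_names.foldl
    (fun return_list name =>
      let download := false
      let sensitive := false
      let download := if download_names.contains name then true else download
      let sensitive := if sensitive_names.contains name then true else sensitive
      return_list ++ [(name, false, download, sensitive)])
    []

-- ===== PORT B =====
-- the dict comprehension {name: [False, False] for name in combined_names}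
def pvInitFlags (combined_names : List String) : PySem.Dict String (Bool × Bool) :=
  combined_names.foldl (fun d name => d.insert name (false, false)) PySem.Dict.empty

-- one pass: if n in flags: flags[n][0] = True
def pvDownPass (d : PySem.Dict String (Bool × Bool)) (n : String) : PySem.Dict String (Bool × Bool) :=
  if d.contains n then d.modify n (false, false) (fun p => (true, p.2)) else d

-- one pass: if n in flags: flags[n][1] = True
def pvSensPass (d : PySem.Dict String (Bool × Bool)) (n : String) : PySem.Dict String (Bool × Bool) :=
  if d.contains n then d.modify n (false, false) (fun p => (p.1, true)) else d

def set_access_controls_alt (combined_names : List String) (download_names : List String) (sensitive_names : List String) : List (String × Bool × Bool × Bool) :=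
  let flags := pvInitFlags combined_names
  let flags := download_names.foldl pvDownPass flags
  let flags := sensitive_names.foldl pvSensPass flags
  combined_names.foldl
    (fun acc name =>
      let p := flags.getD name (false, false)
      acc ++ [(name, false, p.1, p.2)])
    []

-- ===== PRECONDITION & SPEC =====
def Spec_set_access_controls (combined_names : List String) (download_names : List String) (sensitive_names : List String) (out : List (String × Bool × Bool × Bool)) : Prop := out = set_access_controls_alt combined_names download_names sensitive_names
instance (combined_names : List String) (download_names : List String) (sensitive_names : List String) (out : List (String × Bool × Bool × Bool)) : Decidable (Spec_set_access_controls combined_names download_names sensitive_names out) := by unfold Spec_set_access_controls; infer_instance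

-- ===== CLAIM (what is proved, stated in full; the proofs are below) =====
def Claim_equal_set_access_controls : Prop := ∀ (combined_names : List String) (download_names : List String) (sensitive_names : List String), Dom_set_access_controls combined_names download_names sensitive_names → Spec_set_access_controls combined_names download_names sensitive_names (set_access_controls combined_names download_names sensitive_names)

-- ===== LEMMAS AND PROOFS =====

-- generalized init fold facts
lemma pv_foldl_insert_getD (cs : List String) (d : PySem.Dict String (Bool × Bool)) (k : String) :
    (cs.foldl (fun d name => d.insert name (false, false)) d).getD k (false, false)
      = if cs.contains k then (false, false) else d.getD k (false, false) := by
  induction cs generalizing d with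
  | nil => simp
  | cons n tl ih =>
      simp only [List.foldl_cons, ih, PySem.Dict.getD_insert, List.contains_cons]
      by_cases h : k = n <;> simp [h]

lemma pv_foldl_insert_contains (cs : List String) (d : PySem.Dict String (Bool × Bool)) (k : String) :
    (cs.foldl (fun d name => d.insert name (false, false)) d).contains k
      = (cs.contains k || d.contains k) := by
  induction cs generalizing d with
  | nil => simp
  | cons n tl ih =>
      simp only [List.foldl_cons, ih, PySem.Dict.contains_insert, List.contains_cons]
      by_cases h : k = n
      · simp [h]
      · simp [beq_eq_false_iff_ne.mpr h]

lemma pvInitFlags_getD (cs : List String) (k : String) (hk : k ∈ cs) :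
    (pvInitFlags cs).getD k (false, false) = (false, false) := by
  unfold pvInitFlags
  rw [pv_foldl_insert_getD]
  simp [hk]

lemma pvInitFlags_contains (cs : List String) (k : String) :
    (pvInitFlags cs).contains k = cs.contains k := by
  unfold pvInitFlags
  rw [pv_foldl_insert_contains]
  simp

lemma pvDownPass_contains (ds : List String) (d : PySem.Dict String (Bool × Bool)) (k : String) :
    (ds.foldl pvDownPass d).contains k = d.contains k := by
  induction ds generalizing d with
  | nil => simp
  | cons n tl ih =>
      simp only [List.foldl_cons, ih]
      unfold pvDownPass
      split
      · next hc => simp [PySem.Dict.contains_modify]; exact fun he => he ▸ hc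
      · rfl

lemma pvDownPass_getD (ds : List String) (d : PySem.Dict String (Bool × Bool)) (k : String) :
    (ds.foldl pvDownPass d).getD k (false, false)
      = ((d.getD k (false, false)).1 || (d.contains k && ds.contains k),
         (d.getD k (false, false)).2) := by
  induction ds generalizing d with
  | nil => simp
  | cons n tl ih =>
      simp only [List.foldl_cons, ih, List.contains_cons]
      unfold pvDownPass
      split
      · next hc =>
          simp only [PySem.Dict.contains_modify, PySem.Dict.getD_modify]
          by_cases h : k = n
          · subst h; simp [hc]
          · simp [h, beq_eq_false_iff_ne.mpr h]
      · next hc =>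
          by_cases h : k = n
          · subst h
            simp only [Bool.not_eq_true] at hc
            simp [hc]
          · simp [beq_eq_false_iff_ne.mpr h]

lemma pvSensPass_getD (ss : List String) (d : PySem.Dict String (Bool × Bool)) (k : String) :
    (ss.foldl pvSensPass d).getD k (false, false)
      = ((d.getD k (false, false)).1,
         (d.getD k (false, false)).2 || (d.contains k && ss.contains k)) := by
  induction ss generalizing d with
  | nil => simp
  | cons n tl ih =>
      simp only [List.foldl_cons, ih, List.contains_cons]
      unfold pvSensPass
      split
      · next hc =>
          simp only [PySem.Dict.contains_modify, PySem.Dict.getD_modify]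
          by_cases h : k = n
          · subst h; simp [hc]
          · simp [h, beq_eq_false_iff_ne.mpr h]
      · next hc =>
          by_cases h : k = n
          · subst h
            simp only [Bool.not_eq_true] at hc
            simp [hc]
          · simp [beq_eq_false_iff_ne.mpr h]

-- the final flags table realizes exactly A's per-name membership tests
lemma pv_flags_final (cs ds ss : List String) (k : String) (hk : k ∈ cs) :
    ((ss.foldl pvSensPass (ds.foldl pvDownPass (pvInitFlags cs))).getD k (false, false))
      = (ds.contains k, ss.contains k) := by
  rw [pvSensPass_getD, pvDownPass_getD, pvDownPass_contains,
    pvInitFlags_getD cs k hk, pvInitFlags_contains]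
  simp [hk]

-- ===== VERDICT (by name: the statement is the Claim_ definition above) =====
theorem set_access_controls_spec : Claim_equal_set_access_controls := by
  intro cs ds ss _
  unfold Spec_set_access_controls set_access_controls set_access_controls_alt
  simp only [PySem.List.foldl_append_singleton_eq_map]
  apply List.map_congr_left
  intro k hk
  rw [pv_flags_final cs ds ss k hk]
  by_cases h1 : ds.contains k <;> by_cases h2 : ss.contains k <;> simp_all
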